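-- pv_equiv track=rewrite | github.com/justinm-nyc/stream_parse_json | stream_parse_json.py | max_nesting
-- ===== SOURCE A (Python) =====
-- def max_nesting(parser):
--     '''
--     ------- WRITE THIS FUNCTION FIRST ------------
--
--     Return the maximum nesting of json objects in the parsed events.
--
--     Arrays don't count as a level of nesting.
--
--     On the example data, this should return 4.
--
--
--     '''
--     max_nest = 0
--
--     current_nest_number = 0
--
--     for e in parser:
--         if e[0] == "start_map":
--             current_nest_number = current_nest_number + 1
--             if current_nest_number > max_nest:
--                 max_nest = current_nest_number
--         if e[0] == "end_map":
--             current_nest_number = current_nest_number - 1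
--
--     return max_nest
-- ===== SOURCE B (Python) =====
-- def max_nesting(parser):
--     # Pipeline: map events to depth deltas, prefix-sum to a depth profile, reduce with max.
--     DELTA = {"start_map": 1, "end_map": -1}
--     deltas = [DELTA.get(e[0], 0) for e in parser]
--     depths = []
--     run = 0
--     for x in deltas:
--         run += x
--         depths.append(run)
--     return max([0] + depths)
-- ===== Notes on version B (the rewrite author's own statement) =====
-- stated objective: alternative
-- what changed: Replaced A's fused loop that tracks a running counter with an inline conditional max by a three-stage pipeline: map events to depth deltas via a table, prefix-sum the deltas into a depth profile, then reduce the profile (with 0 included) with max.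
import Mathlib
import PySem

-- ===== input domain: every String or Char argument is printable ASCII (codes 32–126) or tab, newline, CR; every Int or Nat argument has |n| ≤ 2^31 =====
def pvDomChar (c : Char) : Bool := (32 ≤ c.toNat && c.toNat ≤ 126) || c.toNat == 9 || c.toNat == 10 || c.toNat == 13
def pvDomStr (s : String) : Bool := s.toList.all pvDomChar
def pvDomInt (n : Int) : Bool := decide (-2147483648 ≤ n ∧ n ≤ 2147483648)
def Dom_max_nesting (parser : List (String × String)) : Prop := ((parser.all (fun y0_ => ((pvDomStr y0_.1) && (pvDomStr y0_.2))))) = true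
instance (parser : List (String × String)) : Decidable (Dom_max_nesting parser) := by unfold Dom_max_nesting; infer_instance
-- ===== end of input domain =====

-- B replaces A's fused counter-and-max loop by a deltas → prefix-sum → max-reduce pipeline (alternative decomposition, same cost).


-- ===== PORT A =====
-- one iteration of A's for-loop: state = (max_nest, current_nest_number)
def pvStepA (st : Int × Int) (e : String × String) : Int × Int :=
  let st1 :=
    if e.1 == "start_map" then
      let cur := st.2 + 1
      if cur > st.1 then (cur, cur) else (st.1, cur)
    else st
  if e.1 == "end_map" then (st1.1, st1.2 - 1) else st1

def max_nesting (parser : List (String × String)) : Int :=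
  (parser.foldl pvStepA (0, 0)).1

-- ===== PORT B =====
def max_nesting_alt (parser : List (String × String)) : Int :=
  let delta : PySem.Dict String Int := PySem.Dict.ofList [("start_map", 1), ("end_map", -1)]
  let deltas := parser.map (fun e => PySem.Dict.getD delta e.1 0)
  let depths := (deltas.foldl (fun (p : List Int × Int) x => (p.1 ++ [p.2 + x], p.2 + x)) ([], 0)).1
  (PySem.List.max? ((0 : Int) :: depths) (fun y => y)).getD 0

-- ===== PRECONDITION & SPEC =====
def Spec_max_nesting (parser : List (String × String)) (out : Int) : Prop := out = max_nesting_alt parser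
instance (parser : List (String × String)) (out : Int) : Decidable (Spec_max_nesting parser out) := by unfold Spec_max_nesting; infer_instance

-- ===== CLAIM (what is proved, stated in full; the proofs are below) =====
def Claim_equal_max_nesting : Prop := ∀ (parser : List (String × String)), Dom_max_nesting parser → Spec_max_nesting parser (max_nesting parser)

-- ===== LEMMAS AND PROOFS =====

/-- The prefix-sum (depth profile) of a delta list starting at depth `cur`. -/
def pvScan (cur : Int) : List Int → List Int
  | [] => []
  | x :: xs => (cur + x) :: pvScan (cur + x) xs

/-- `max` over `{cur}` together with all running depths from `cur` along the deltas. -/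
def pvM (cur : Int) : List Int → Int
  | [] => cur
  | x :: xs => max cur (pvM (cur + x) xs)

theorem pvle_M (ds : List Int) (c : Int) : c ≤ pvM c ds := by
  cases ds with
  | nil => simp [pvM]
  | cons x xs => simp [pvM]

theorem pvScan_foldl_acc (ds : List Int) (acc : List Int) (cur : Int) :
    (ds.foldl (fun (p : List Int × Int) x => (p.1 ++ [p.2 + x], p.2 + x)) (acc, cur)).1
      = acc ++ pvScan cur ds := by
  induction ds generalizing acc cur with
  | nil => simp [pvScan]
  | cons x xs ih => simp [pvScan, ih, List.append_assoc]

theorem pvFoldMax_scan (ds : List Int) (a c : Int) (h : c ≤ a) :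
    (pvScan c ds).foldl max a = max a (pvM c ds) := by
  induction ds generalizing a c with
  | nil => simp [pvScan, pvM]; omega
  | cons x xs ih =>
    have h1 := ih (max a (c + x)) (c + x) (le_max_right _ _)
    have h2 := pvle_M xs (c + x)
    simp [pvScan, pvM, List.foldl_cons, h1]
    omega

/-- The event-classification function shared by both readings. -/
def pvDelta (s : String) : Int :=
  if s == "start_map" then 1 else if s == "end_map" then -1 else 0

/-- B's delta table agrees with the branch classification. -/
theorem pvDelta_eq (s : String) :
    PySem.Dict.getD (PySem.Dict.ofList [("start_map", (1 : Int)), ("end_map", -1)]) s 0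
      = pvDelta s := by
  have h : PySem.Dict.ofList [("start_map", (1 : Int)), ("end_map", -1)]
      = (PySem.Dict.empty.insert "start_map" 1).insert "end_map" (-1) := by rfl
  rw [h, PySem.Dict.getD_insert, PySem.Dict.getD_insert, PySem.Dict.getD_empty]
  unfold pvDelta
  by_cases h1 : s = "start_map" <;> by_cases h2 : s = "end_map" <;> simp_all

/-- A's loop from state `(mx, cur)` with `cur ≤ mx` computes `max mx` of all running depths. -/
theorem pvA_loop (events : List (String × String)) (mx cur : Int) (h : cur ≤ mx) :
    (events.foldl pvStepA (mx, cur)).1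
      = max mx (pvM cur (events.map (fun e => pvDelta e.1))) := by
  induction events generalizing mx cur with
  | nil => simp [pvM]; omega
  | cons e es ih =>
    rw [List.foldl_cons, List.map_cons]
    by_cases h1 : e.1 = "start_map"
    · have hstep : pvStepA (mx, cur) e = (max mx (cur + 1), cur + 1) := by
        simp only [pvStepA, h1]
        rcases le_or_gt (cur + 1) mx with hle | hgt
        · have : ¬ (cur + 1 > mx) := by omega
          simp [this]
          omega
        · simp [hgt]
          omega
      rw [hstep, ih _ _ (le_max_right _ _)]
      have hM := pvle_M (es.map (fun e => pvDelta e.1)) (cur + 1)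
      have hd : pvDelta e.1 = 1 := by simp [pvDelta, h1]
      rw [hd]
      simp only [pvM]
      omega
    · by_cases h2 : e.1 = "end_map"
      · have hstep : pvStepA (mx, cur) e = (mx, cur - 1) := by
          simp [pvStepA, h2]
        rw [hstep, ih _ _ (by omega)]
        have hd : pvDelta e.1 = -1 := by simp [pvDelta, h2]
        rw [hd]
        simp only [pvM]
        have he : cur + (-1) = cur - 1 := by ring
        rw [he]
        omega
      · have hstep : pvStepA (mx, cur) e = (mx, cur) := by
          simp [pvStepA, h1, h2]
        rw [hstep, ih _ _ h]
        have hM := pvle_M (es.map (fun e => pvDelta e.1)) cur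
        have hd : pvDelta e.1 = 0 := by simp [pvDelta, h1, h2]
        rw [hd]
        simp only [pvM]
        have he : cur + 0 = cur := by ring
        rw [he]
        omega

-- ===== VERDICT (by name: the statement is the Claim_ definition above) =====
theorem max_nesting_spec : Claim_equal_max_nesting := by
  intro parser _
  unfold Spec_max_nesting max_nesting max_nesting_alt
  simp only [PySem.List.max?_id_cons, Option.getD_some]
  rw [pvScan_foldl_acc, List.nil_append, pvFoldMax_scan _ _ _ le_rfl]
  simp only [pvDelta_eq]
  exact pvA_loop parser 0 0 le_rfl
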